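-- pv_equiv track=rewrite | github.com/evgeniychernyshev/shop | app/shop.py | best_shop_sum_profit_weekly
-- ===== SOURCE A (Python) =====
-- def best_shop_sum_profit_weekly(shops):
--     total_profit = []
--
--     for shop in shops:
--         shop_profit = 0
--
--         for s in shop:
--             shop_profit += s
--         total_profit.append(shop_profit)
--
--     max_profit = max(total_profit)
--     index = total_profit.index(max_profit)
--     return [index, int(max_profit)]
-- ===== SOURCE B (Python) =====
-- def best_shop_sum_profit_weekly(shops):
--     best_i = None
--     best_s = None
--     i = 0
--     for shop in shops:
--         s = sum(shop)
--         if best_s is None or s > best_s: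
--             best_i = i
--             best_s = s
--         i += 1
--     if best_s is None:
--         raise ValueError("max() arg is an empty sequence")
--     return [best_i, int(best_s)]
-- ===== Notes on version B (the rewrite author's own statement) =====
-- stated objective: alternative
-- what changed: Single pass over shops maintaining best index and best sum, replacing A's intermediate total_profit list plus the separate max() and .index() scans.
-- outside the precondition, e.g. on best_shop_sum_profit_weekly([]): A raises ValueError, B raises ValueError
import Mathlib
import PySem

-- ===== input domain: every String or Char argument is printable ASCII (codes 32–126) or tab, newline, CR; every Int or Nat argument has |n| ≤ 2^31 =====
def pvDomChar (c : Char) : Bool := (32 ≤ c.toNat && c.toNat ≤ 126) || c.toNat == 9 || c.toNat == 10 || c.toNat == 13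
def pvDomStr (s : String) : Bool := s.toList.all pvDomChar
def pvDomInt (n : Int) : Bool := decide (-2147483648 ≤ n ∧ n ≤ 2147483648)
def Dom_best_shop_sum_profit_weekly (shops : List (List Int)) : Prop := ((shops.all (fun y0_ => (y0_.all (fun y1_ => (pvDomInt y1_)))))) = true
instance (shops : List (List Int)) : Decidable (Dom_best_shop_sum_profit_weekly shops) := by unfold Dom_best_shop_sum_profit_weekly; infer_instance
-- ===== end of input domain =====

-- B replaces A's total_profit list and its two extra scans (max, .index) by one pass
-- tracking the best index and best sum (alternative decomposition; same asymptotic cost).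


-- ===== PORT A =====
def best_shop_sum_profit_weekly (shops : List (List Int)) : List Int :=
  let total_profit : List Int :=
    shops.foldl (fun acc shop => acc ++ [shop.foldl (fun p s => p + s) 0]) []
  match PySem.List.max? total_profit (fun x => x) with
  | none => []   -- max([]) raises ValueError: excluded by Pre_
  | some max_profit =>
    match PySem.List.index? total_profit max_profit with
    | none => []   -- unreachable: max_profit ∈ total_profit
    | some index => [(index : Int), max_profit]

-- ===== PORT B =====
def best_shop_sum_profit_weekly_alt (shops : List (List Int)) : List Int :=
  let st := shops.foldl
    (fun (st : Int × Option (Int × Int)) shop =>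
      let s := shop.sum
      match st.2 with
      | none => (st.1 + 1, some (st.1, s))
      | some (bi, bs) => if s > bs then (st.1 + 1, some (st.1, s)) else (st.1 + 1, some (bi, bs)))
    ((0 : Int), (none : Option (Int × Int)))
  match st.2 with
  | none => []   -- raise ValueError: excluded by Pre_
  | some (best_i, best_s) => [best_i, best_s]

-- ===== PRECONDITION & SPEC =====
-- Pre_ excludes only the empty list, on which A's max([]) raises ValueError (B raises too).
def Pre_best_shop_sum_profit_weekly (shops : List (List Int)) : Prop := shops ≠ []
instance (shops : List (List Int)) : Decidable (Pre_best_shop_sum_profit_weekly shops) := by unfold Pre_best_shop_sum_profit_weekly; infer_instance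
def pvWitness_best_shop_sum_profit_weekly : List (List Int) := [[1, 2], [3]]
def Spec_best_shop_sum_profit_weekly (shops : List (List Int)) (out : List Int) : Prop := out = best_shop_sum_profit_weekly_alt shops
instance (shops : List (List Int)) (out : List Int) : Decidable (Spec_best_shop_sum_profit_weekly shops out) := by unfold Spec_best_shop_sum_profit_weekly; infer_instance

-- ===== CLAIM (what is proved, stated in full; the proofs are below) =====
def Claim_equal_best_shop_sum_profit_weekly : Prop := ∀ (shops : List (List Int)), Dom_best_shop_sum_profit_weekly shops → Pre_best_shop_sum_profit_weekly shops → Spec_best_shop_sum_profit_weekly shops (best_shop_sum_profit_weekly shops)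

-- ===== LEMMAS AND PROOFS =====

-- B's loop body, viewed as a function of the current state and the shop's sum.
def pvBStep (st : Int × Option (Int × Int)) (s : Int) : Int × Option (Int × Int) :=
  match st.2 with
  | none => (st.1 + 1, some (st.1, s))
  | some (bi, bs) => if s > bs then (st.1 + 1, some (st.1, s)) else (st.1 + 1, some (bi, bs))

lemma pv_idx_mem {l : List Int} {x : Int} {i : Nat} (h : List.idxOf? x l = some i) : x ∈ l := by
  rw [List.idxOf?_eq_some_iff] at h
  obtain ⟨hi, he, _⟩ := h
  exact he ▸ List.getElem_mem hi

lemma pv_idx_append {l : List Int} {x y : Int} {i : Nat} (h : List.idxOf? x l = some i) :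
    List.idxOf? x (l ++ [y]) = some i := by
  rw [List.idxOf?_eq_some_iff] at h ⊢
  obtain ⟨hi, he, hj⟩ := h
  refine ⟨by simp; omega, ?_, ?_⟩
  · rw [List.getElem_append_left hi]; exact he
  · intro j hji
    rw [List.getElem_append_left (Nat.lt_trans hji hi)]
    exact hj j hji

lemma pv_idx_last {l : List Int} {x : Int} (hx : x ∉ l) :
    List.idxOf? x (l ++ [x]) = some l.length := by
  rw [List.idxOf?_eq_some_iff]
  refine ⟨by simp, by simp, fun j hj => ?_⟩
  rw [List.getElem_append_left hj]
  intro he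
  exact hx (he ▸ List.getElem_mem hj)

-- Loop invariant for B's single pass over the list of shop sums:
-- starting from a state whose best is the first occurrence of the running max of p,
-- the fold over l ends in a state whose best is the first occurrence of the max of p ++ l.
lemma pv_bloop (l : List Int) : ∀ (p : List Int) (n : Nat) (bs : Int),
    List.idxOf? bs p = some n → (∀ x ∈ p, x ≤ bs) →
    ∃ (n' : Nat) (bs' : Int),
      (l.foldl pvBStep ((p.length : Int), some ((n : Int), bs))).2 = some ((n' : Int), bs') ∧
      List.idxOf? bs' (p ++ l) = some n' ∧ (∀ x ∈ p ++ l, x ≤ bs') := by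
  induction l with
  | nil =>
    intro p n bs hidx hle
    exact ⟨n, bs, rfl, by simpa using hidx, by simpa using hle⟩
  | cons x l ih =>
    intro p n bs hidx hle
    by_cases hgt : x > bs
    · have hnotmem : x ∉ p := fun hm => absurd (hle x hm) (by omega)
      have hidx' : List.idxOf? x (p ++ [x]) = some p.length := pv_idx_last hnotmem
      have hle' : ∀ y ∈ p ++ [x], y ≤ x := by
        intro y hy
        rcases List.mem_append.mp hy with hy | hy
        · exact le_of_lt (lt_of_le_of_lt (hle y hy) hgt)
        · simp at hy; omega
      obtain ⟨n', bs', h1, h2, h3⟩ := ih (p ++ [x]) p.length x hidx' hle'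
      refine ⟨n', bs', ?_, ?_, ?_⟩
      · rw [List.foldl_cons]
        have hstep : pvBStep ((p.length : Int), some ((n : Int), bs)) x
            = (((p ++ [x]).length : Int), some (((p.length : Nat) : Int), x)) := by
          simp [pvBStep, hgt]
        rw [hstep]; exact h1
      · simpa [List.append_assoc] using h2
      · intro y hy; apply h3; simpa [List.append_assoc] using hy
    · have hxle : x ≤ bs := by omega
      have hidx' : List.idxOf? bs (p ++ [x]) = some n := pv_idx_append hidx
      have hle' : ∀ y ∈ p ++ [x], y ≤ bs := by
        intro y hy
        rcases List.mem_append.mp hy with hy | hy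
        · exact hle y hy
        · simp at hy; omega
      obtain ⟨n', bs', h1, h2, h3⟩ := ih (p ++ [x]) n bs hidx' hle'
      refine ⟨n', bs', ?_, ?_, ?_⟩
      · rw [List.foldl_cons]
        have hstep : pvBStep ((p.length : Int), some ((n : Int), bs)) x
            = (((p ++ [x]).length : Int), some ((n : Int), bs)) := by
          simp [pvBStep, hgt]
        rw [hstep]; exact h1
      · simpa [List.append_assoc] using h2
      · intro y hy; apply h3; simpa [List.append_assoc] using hy

-- Python's max over a nonempty list never yields none.
def pvMStep (acc : Option Int) (x : Int) : Option Int :=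
  match acc with
  | none => some x
  | some m => if (fun y => y) m < (fun y => y) x then some x else some m

lemma pv_mstep_isSome (acc : Option Int) (x : Int) : (pvMStep acc x).isSome := by
  cases acc with
  | none => rfl
  | some a => simp only [pvMStep]; split <;> rfl

lemma pv_foldl_mstep_isSome (ys : List Int) : ∀ (acc : Option Int), acc.isSome →
    (List.foldl pvMStep acc ys).isSome := by
  induction ys with
  | nil => intro acc h; exact h
  | cons y ys ih =>
    intro acc _
    rw [List.foldl_cons]
    exact ih _ (pv_mstep_isSome acc y)

lemma pv_max?_isSome {l : List Int} (h : l ≠ []) :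
    (PySem.List.max? l (fun x => x)).isSome := by
  have hfun : PySem.List.max? l (fun x => x) = List.foldl pvMStep none l := by
    unfold PySem.List.max?
    congr 1
    funext acc x
    cases acc <;> simp [pvMStep]
  rw [hfun]
  cases l with
  | nil => exact absurd rfl h
  | cons x xs =>
    rw [List.foldl_cons]
    exact pv_foldl_mstep_isSome xs _ (pv_mstep_isSome none x)

theorem best_shop_sum_profit_weekly_spec_aux (shops : List (List Int))
    (hne : shops ≠ []) :
    best_shop_sum_profit_weekly shops = best_shop_sum_profit_weekly_alt shops := by
  -- Both sides compute from the list of per-shop sums.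
  have hsums : shops.foldl (fun acc shop => acc ++ [shop.foldl (fun p s => p + s) 0]) []
      = shops.map List.sum := by
    rw [PySem.List.foldl_append_singleton_eq_map]
    exact List.map_congr_left (fun shop _ => List.sum_eq_foldl.symm)
  have hBfold : shops.foldl
      (fun (st : Int × Option (Int × Int)) shop =>
        let s := shop.sum
        match st.2 with
        | none => (st.1 + 1, some (st.1, s))
        | some (bi, bs) => if s > bs then (st.1 + 1, some (st.1, s)) else (st.1 + 1, some (bi, bs)))
      ((0 : Int), (none : Option (Int × Int)))
      = (shops.map List.sum).foldl pvBStep ((0 : Int), none) := by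
    rw [List.foldl_map]
    rfl
  obtain ⟨s0, rest, hcons⟩ : ∃ s0 rest, shops.map List.sum = s0 :: rest := by
    cases hs : shops with
    | nil => exact absurd hs hne
    | cons a as => exact ⟨a.sum, as.map List.sum, by simp⟩
  -- run B's loop: first iteration installs (0, s0), then the invariant takes over
  obtain ⟨n', bs', hfold, hidx, hmax⟩ :=
    pv_bloop rest [s0] 0 s0 (by simp [List.idxOf?_cons]) (by simp)
  have hfold' : (List.foldl pvBStep ((0 : Int), none) (s0 :: rest)).2 = some ((n' : Int), bs') := by
    rw [List.foldl_cons]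
    have : pvBStep ((0 : Int), none) s0 = ((([s0] : List Int).length : Int), some (((0 : Nat) : Int), s0)) := by
      simp [pvBStep]
    rw [this]
    exact hfold
  have hmem : bs' ∈ s0 :: rest := by
    have := pv_idx_mem hidx; simpa using this
  -- identify A's max with bs'
  have hms : ∃ m, PySem.List.max? (s0 :: rest) (fun x => x) = some m := by
    rcases Option.isSome_iff_exists.mp (pv_max?_isSome (l := s0 :: rest) (by simp)) with ⟨m, hm⟩
    exact ⟨m, hm⟩
  obtain ⟨m, hm⟩ := hms
  have hmmem : m ∈ s0 :: rest := PySem.List.max?_mem hm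
  have hmeq : m = bs' := by
    have h1 : m ≤ bs' := hmax m (by simpa using hmmem)
    have h2 : bs' ≤ m := PySem.List.max?_isMax hm bs' hmem
    omega
  have hidxA : PySem.List.index? (s0 :: rest) m = some n' := by
    rw [hmeq]
    simpa [PySem.List.index?, List.append_nil] using hidx
  rw [hmeq] at hm hidxA
  -- assemble
  unfold best_shop_sum_profit_weekly best_shop_sum_profit_weekly_alt
  simp only [hsums, hBfold, hcons, hfold', hm, hidxA]

-- ===== VERDICT (by name: the statement is the Claim_ definition above) =====
theorem best_shop_sum_profit_weekly_spec : Claim_equal_best_shop_sum_profit_weekly := by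
  intro shops _ hpre
  exact best_shop_sum_profit_weekly_spec_aux shops hpre
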